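-- pv_equiv track=rewrite | github.com/DivineJK/MyPythonLibrary | MathLibrary/Convolution/Convolution_and.py | fzt1
-- ===== SOURCE A (Python) =====
-- def fzt1(f, modulo=0):
--     n = len(f)
--     bin_top = 1
--     depth = 0
--     while bin_top < n:
--         depth += 1
--         bin_top <<= 1
--     res = [0]*bin_top
--     for i in range(n):
--         res[i] = f[i]
--     for i in range(depth):
--         offset = 1 << (i+1)
--         for j in range(0, bin_top, offset):
--             for k in range(1<<i):
--                 res[j+k] += res[j+k+(1<<i)]
--                 if modulo:
--                     if res[j+k] >= modulo:
--                         res[j+k] -= modulo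
--     return res
-- ===== SOURCE B (Python) =====
-- def fzt1(f, modulo=0):
--     n = len(f)
--     bin_top = 1
--     while bin_top < n:
--         bin_top <<= 1
--     res = f[:] + [0] * (bin_top - n)
--
--     def cadd(x, y):
--         s = x + y
--         if modulo and s >= modulo:
--             s -= modulo
--         return s
--
--     def rec(a):
--         # superset-sum transform of a power-of-two block, divide and conquer
--         if len(a) <= 1:
--             return a
--         h = len(a) // 2
--         lo = rec(a[:h])
--         hi = rec(a[h:])
--         return [cadd(x, y) for x, y in zip(lo, hi)] + hi
--
--     return rec(res)
-- ===== Notes on version B (the rewrite author's own statement) =====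
-- stated objective: alternative
-- what changed: Replaces A's iterative bit-by-bit triple loop with in-place index updates by a recursive divide-and-conquer over the top bit: transform each half, then combine halves with one zip pass (same conditional modular subtraction).
import Mathlib
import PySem

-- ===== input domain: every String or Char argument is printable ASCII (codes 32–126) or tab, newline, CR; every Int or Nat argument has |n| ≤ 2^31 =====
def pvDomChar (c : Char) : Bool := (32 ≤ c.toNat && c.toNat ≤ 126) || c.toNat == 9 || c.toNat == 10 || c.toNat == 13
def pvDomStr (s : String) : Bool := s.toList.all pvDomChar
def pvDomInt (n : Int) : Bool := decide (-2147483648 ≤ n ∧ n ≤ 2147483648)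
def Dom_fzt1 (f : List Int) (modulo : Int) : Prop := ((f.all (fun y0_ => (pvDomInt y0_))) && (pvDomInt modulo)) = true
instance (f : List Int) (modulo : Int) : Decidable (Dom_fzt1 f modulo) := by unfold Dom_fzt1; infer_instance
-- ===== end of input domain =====

-- B is an alternative, structurally different implementation: divide-and-conquer over the top
-- bit instead of A's iterative bit-level triple loop; same cost, same results.

-- ===== PORT A =====
-- A's 'while bin_top < n: depth += 1; bin_top <<= 1' loop (the 'bt = 0' test is only a
-- totality guard: A is always called with bt = 1, and the guard branch is unreachable).
def fzt1BT (n bt depth : Nat) : Nat × Nat :=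
  if bt = 0 then (bt, depth)
  else if bt < n then fzt1BT n (bt * 2) (depth + 1)
  else (bt, depth)
termination_by n - bt
decreasing_by omega

def fzt1 (f : List Int) (modulo : Int) : List Int :=
  let n := f.length
  let p := fzt1BT n 1 0
  let bin_top := p.1
  let depth := p.2
  let res0 := (List.range n).foldl
    (fun r (i : Nat) => PySem.List.pySetD r (i : Int) (PySem.List.pyGetD f (i : Int) 0))
    (List.replicate bin_top 0)
  (List.range depth).foldl (fun r i =>
    let offset : Int := 2 ^ (i + 1)
    (PySem.List.pyRange 0 (bin_top : Int) offset).foldl (fun r j =>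
      (List.range (2 ^ i)).foldl (fun r (k : Nat) =>
        let r := PySem.List.pySetD r (j + (k : Int))
          (PySem.List.pyGetD r (j + (k : Int)) 0 + PySem.List.pyGetD r (j + (k : Int) + 2 ^ i) 0)
        if modulo ≠ 0 then
          if PySem.List.pyGetD r (j + (k : Int)) 0 ≥ modulo then
            PySem.List.pySetD r (j + (k : Int)) (PySem.List.pyGetD r (j + (k : Int)) 0 - modulo)
          else r
        else r) r) r) res0

-- ===== PORT B =====
-- B's 'while bin_top < n: bin_top <<= 1' (same totality guard remark as for fzt1BT).
def fzt1AltBT (n bt : Nat) : Nat :=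
  if bt = 0 then bt
  else if bt < n then fzt1AltBT n (bt * 2)
  else bt
termination_by n - bt
decreasing_by omega

-- B's helper 'cadd': add, then the single conditional modular subtraction.
def fzt1Cadd (modulo x y : Int) : Int :=
  let s := x + y
  if modulo ≠ 0 ∧ s ≥ modulo then s - modulo else s

-- B's recursive helper 'rec': transform both halves, then combine with the top bit.
def fzt1Rec (modulo : Int) (a : List Int) : List Int :=
  if _h : a.length ≤ 1 then a
  else
    let half := a.length / 2
    let lo := fzt1Rec modulo (a.take half)
    let hi := fzt1Rec modulo (a.drop half)
    (lo.zip hi).map (fun p => fzt1Cadd modulo p.1 p.2) ++ hi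
termination_by a.length
decreasing_by
· simp; omega
· simp; omega

def fzt1_alt (f : List Int) (modulo : Int) : List Int :=
  let n := f.length
  let bin_top := fzt1AltBT n 1
  let res := f ++ List.replicate (bin_top - n) 0
  fzt1Rec modulo res

-- ===== PRECONDITION & SPEC =====
def Spec_fzt1 (f : List Int) (modulo : Int) (out : List Int) : Prop := out = fzt1_alt f modulo
instance (f : List Int) (modulo : Int) (out : List Int) : Decidable (Spec_fzt1 f modulo out) := by unfold Spec_fzt1; infer_instance

-- ===== CLAIM (what is proved, stated in full; the proofs are below) =====
def Claim_equal_fzt1 : Prop := ∀ (f : List Int) (modulo : Int), Dom_fzt1 f modulo → Spec_fzt1 f modulo (fzt1 f modulo)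

-- ===== LEMMAS AND PROOFS =====


-- Proof-side view of A's innermost loop body (one 'res[j+k] += …; conditional subtract' step).
def pvStep (m : Int) (hoff : Int) (r : List Int) (t : Int) : List Int :=
  let r := PySem.List.pySetD r t (PySem.List.pyGetD r t 0 + PySem.List.pyGetD r (t + hoff) 0)
  if m ≠ 0 then
    if PySem.List.pyGetD r t 0 ≥ m then
      PySem.List.pySetD r t (PySem.List.pyGetD r t 0 - m)
    else r
  else r

-- One block of A's middle loop: the k-loop at block start j.
def pvBlock (m : Int) (H : Nat) (r : List Int) (j : Int) : List Int :=
  (List.range H).foldl (fun r (k : Nat) => pvStep m (H : Int) r (j + (k : Int))) r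

-- Functional form of one whole level (half-block width h) of the transform.
def pvLevel (m : Int) (h : Nat) (xs : List Int) : List Int :=
  if _h0 : h = 0 ∨ xs.length < 2 * h then xs
  else
    (List.zipWith (fzt1Cadd m) (xs.take h) ((xs.drop h).take h)) ++
      ((xs.drop h).take h ++ pvLevel m h (xs.drop (2 * h)))
termination_by xs.length
decreasing_by simp; omega

-- Levels 0..d-1 applied in order.
def pvAL (m : Int) (d : Nat) (xs : List Int) : List Int :=
  (List.range d).foldl (fun s i => pvLevel m (2 ^ i) s) xs

lemma fzt1AltBT_eq (n bt d : Nat) : fzt1AltBT n bt = (fzt1BT n bt d).1 := by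
  rw [fzt1AltBT, fzt1BT]
  by_cases h0 : bt = 0
  · simp [h0]
  · by_cases h1 : bt < n
    · simp [h0, h1]; exact fzt1AltBT_eq n (bt * 2) (d + 1)
    · simp [h0, h1]
termination_by n - bt
decreasing_by omega

lemma fzt1BT_pow (n bt d : Nat) (hb : bt = 2 ^ d) : (fzt1BT n bt d).1 = 2 ^ (fzt1BT n bt d).2 := by
  rw [fzt1BT]
  split
  · exact hb
  · split
    · exact fzt1BT_pow n (bt * 2) (d + 1) (by rw [hb, pow_succ])
    · exact hb
termination_by n - bt
decreasing_by omega

lemma fzt1BT_ge (n bt d : Nat) (hb : bt ≠ 0) : n ≤ (fzt1BT n bt d).1 := by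
  rw [fzt1BT]
  split
  · omega
  · split
    · exact fzt1BT_ge n (bt * 2) (d + 1) (by omega)
    · simp; omega
termination_by n - bt
decreasing_by omega

lemma pvPad (f : List Int) : ∀ (k : Nat) (r : List Int), k ≤ f.length → k ≤ r.length →
    (List.range k).foldl (fun r (i : Nat) => PySem.List.pySetD r (i : Int) (PySem.List.pyGetD f (i : Int) 0)) r
      = f.take k ++ r.drop k := by
  intro k
  induction k with
  | zero => intro r _ _; simp
  | succ k ih =>
    intro r hk hr
    rw [List.range_succ, List.foldl_append]
    simp only [List.foldl_cons, List.foldl_nil]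
    rw [ih r (by omega) (by omega)]
    rw [PySem.List.pySetD_natCast, PySem.List.pyGetD_natCast]
    have hkf : k < f.length := by omega
    have hkr : k < r.length := by omega
    have hlen : (f.take k).length = k := by simp; omega
    rw [List.drop_eq_getElem_cons hkr, List.set_append_right k _ (by omega),
      List.getD_eq_getElem f 0 hkf]
    simp only [hlen, Nat.sub_self, List.set_cons_zero]
    have ht : List.take (k + 1) f = List.take k f ++ [f[k]] := by
      rw [List.take_add_one, List.getElem?_eq_getElem hkf]
      rfl
    rw [ht, List.append_assoc]
    rfl

lemma pvStep_cons (m : Int) (H : Nat) (p : Int) (r : List Int) (n : Nat) :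
    pvStep m (H : Int) (p :: r) ((n + 1 : Nat) : Int) = p :: pvStep m (H : Int) r (n : Int) := by
  have e1 : ((n + 1 : Nat) : Int) + (H : Int) = ((n + H + 1 : Nat) : Int) := by push_cast; ring
  have e2 : ((n : Nat) : Int) + (H : Int) = ((n + H : Nat) : Int) := by push_cast; ring
  simp only [pvStep, e1, e2, PySem.List.pyGetD_natCast, PySem.List.pySetD_natCast,
    List.getD_cons_succ, List.set_cons_succ]
  split_ifs <;> rfl

lemma pvStep_spec (m : Int) (H : Nat) (x y : Int) :
    ∀ (pre u v : List Int), u.length + 1 = H →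
    pvStep m (H : Int) (pre ++ x :: (u ++ y :: v)) (pre.length : Int)
      = pre ++ fzt1Cadd m x y :: (u ++ y :: v) := by
  intro pre
  induction pre with
  | cons p pre ih =>
    intro u v hu
    show pvStep m (H : Int) (p :: (pre ++ x :: (u ++ y :: v))) ((pre.length + 1 : Nat) : Int) = _
    rw [pvStep_cons, ih u v hu]
    rfl
  | nil =>
    intro u v hu
    rw [pvStep]
    have e0 : ((List.nil (α := Int)).length : Int) = (0 : Int) := rfl
    rw [List.nil_append, e0]
    have eH : ((0 : Int) + (H : Int)) = ((H : Nat) : Int) := by simp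
    rw [eH, PySem.List.pyGetD_natCast, ← hu]
    have gy : (x :: (u ++ y :: v)).getD (u.length + 1) 0 = y := by
      simp
    rw [gy]
    have s0 : ∀ (l : List Int) (a w : Int), PySem.List.pySetD (a :: l) 0 w = w :: l := by
      intro l a w
      rw [PySem.List.pySetD_of_nonneg _ _ (by norm_num)]
      rfl
    simp only [pysem, List.getD_cons_zero, s0, fzt1Cadd]
    split_ifs <;> simp_all

lemma pvInnerK (m : Int) (H : Nat) :
    ∀ (lo hi mid pre rest : List Int), lo.length = hi.length → lo.length + mid.length = H →
    (List.range lo.length).foldl (fun r (k : Nat) => pvStep m (H : Int) r ((pre.length : Int) + (k : Int)))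
        (pre ++ (lo ++ (mid ++ (hi ++ rest))))
      = pre ++ (List.zipWith (fzt1Cadd m) lo hi ++ (mid ++ (hi ++ rest))) := by
  intro lo
  induction lo with
  | nil => intro hi mid pre rest _ _; simp
  | cons x lo ih =>
    intro hi mid pre rest hlh hH
    cases hi with
    | nil => simp at hlh
    | cons y hi =>
      rw [List.length_cons, List.range_succ_eq_map]
      simp only [List.foldl_cons, Nat.cast_zero, add_zero]
      have hre : pre ++ ((x :: lo) ++ (mid ++ ((y :: hi) ++ rest)))
          = pre ++ x :: ((lo ++ mid) ++ y :: (hi ++ rest)) := by simp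
      rw [hre, pvStep_spec m H x y pre (lo ++ mid) (hi ++ rest) (by simp at hH ⊢; omega)]
      rw [List.foldl_map]
      have hfun : (fun (r : List Int) (k : Nat) => pvStep m (H : Int) r ((pre.length : Int) + ((Nat.succ k : Nat) : Int)))
          = fun (r : List Int) (k : Nat) => pvStep m (H : Int) r (((pre ++ [fzt1Cadd m x y]).length : Int) + (k : Int)) := by
        funext r k
        congr 1
        simp [Nat.succ_eq_add_one]
        ring
      have hre2 : pre ++ fzt1Cadd m x y :: ((lo ++ mid) ++ y :: (hi ++ rest))
          = (pre ++ [fzt1Cadd m x y]) ++ (lo ++ ((mid ++ [y]) ++ (hi ++ rest))) := by simp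
      rw [hfun, hre2, ih hi (mid ++ [y]) (pre ++ [fzt1Cadd m x y]) rest (by simpa using hlh) (by simp at hH ⊢; omega)]
      simp

lemma pvLevel_nil (m : Int) (h : Nat) : pvLevel m h [] = [] := by
  rw [pvLevel]
  rcases Nat.eq_zero_or_pos h with h0 | h0 <;> simp [h0]

lemma pvLevel_block (m : Int) (h : Nat) (hh : h ≠ 0) (lo hi rest : List Int)
    (hlo : lo.length = h) (hhi : hi.length = h) :
    pvLevel m h (lo ++ (hi ++ rest))
      = List.zipWith (fzt1Cadd m) lo hi ++ (hi ++ pvLevel m h rest) := by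
  have h1 : (lo ++ (hi ++ rest)).take h = lo := List.take_left' hlo
  have h2 : (lo ++ (hi ++ rest)).drop h = hi ++ rest := List.drop_left' hlo
  have h3 : ((lo ++ (hi ++ rest)).drop h).take h = hi := by
    rw [h2]
    exact List.take_left' hhi
  have h4 : (lo ++ (hi ++ rest)).drop (2 * h) = rest := by
    rw [← List.append_assoc]
    exact List.drop_left' (by simp [hlo, hhi]; omega)
  rw [pvLevel, dif_neg (by simp only [not_or, not_lt]; exact ⟨hh, by simp [hlo, hhi]; omega⟩), h1, h3, h4]

lemma pvLevel_length (m : Int) (h : Nat) (xs : List Int) : (pvLevel m h xs).length = xs.length := by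
  fun_induction pvLevel m h xs with
  | case1 => rfl
  | case2 xs h1 ih =>
    simp only [not_or, not_lt] at h1
    simp [ih, List.length_take, List.length_drop]
    omega

lemma pvBlocks (m : Int) (H : Nat) (hH : H ≠ 0) :
    ∀ (nb : Nat) (pre rest : List Int), rest.length = nb * (2 * H) →
    (List.range nb).foldl (fun r (t : Nat) => pvBlock m H r ((pre.length : Int) + ((2 * H : Nat) : Int) * (t : Int))) (pre ++ rest)
      = pre ++ pvLevel m H rest := by
  intro nb
  induction nb with
  | zero =>
    intro pre rest hlen
    have hnil : rest = [] := List.eq_nil_of_length_eq_zero (by simpa using hlen)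
    subst hnil
    simp [pvLevel_nil]
  | succ nb ih =>
    intro pre rest hlen
    have hmul : (nb + 1) * (2 * H) = nb * (2 * H) + 2 * H := by ring
    have h2H : 2 * H ≤ rest.length := by omega
    have hlo : (rest.take H).length = H := by simp; omega
    have hhi : ((rest.drop H).take H).length = H := by simp; omega
    have e3 : (rest.drop H).drop H = rest.drop (2 * H) := by
      rw [List.drop_drop]
      congr 1
      omega
    have hdecomp : rest = rest.take H ++ ((rest.drop H).take H ++ rest.drop (2 * H)) := by
      calc rest = rest.take H ++ rest.drop H := (List.take_append_drop H rest).symm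
        _ = rest.take H ++ ((rest.drop H).take H ++ (rest.drop H).drop H) := by
              rw [List.take_append_drop H (rest.drop H)]
        _ = rest.take H ++ ((rest.drop H).take H ++ rest.drop (2 * H)) := by rw [e3]
    rw [List.range_succ_eq_map]
    simp only [List.foldl_cons, Nat.cast_zero, mul_zero, add_zero]
    have hre : pre ++ rest
        = pre ++ ((rest.take H) ++ ([] ++ ((rest.drop H).take H ++ rest.drop (2 * H)))) := by
      conv_lhs => rw [hdecomp]
      simp
    have hik := pvInnerK m H (rest.take H) ((rest.drop H).take H) [] pre (rest.drop (2 * H))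
      (by rw [hlo, hhi]) (by rw [hlo]; simp)
    rw [hlo] at hik
    rw [pvBlock, hre, hik]
    rw [List.foldl_map]
    have hzw : (List.zipWith (fzt1Cadd m) (rest.take H) ((rest.drop H).take H)).length = H := by
      simp [hlo, hhi]
    have hfun : (fun (r : List Int) (t : Nat) =>
          pvBlock m H r ((pre.length : Int) + ((2 * H : Nat) : Int) * ((Nat.succ t : Nat) : Int)))
        = fun (r : List Int) (t : Nat) =>
          pvBlock m H r
            ((((pre ++ (List.zipWith (fzt1Cadd m) (rest.take H) ((rest.drop H).take H) ++ (rest.drop H).take H)).length : Nat) : Int)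
              + ((2 * H : Nat) : Int) * (t : Int)) := by
      funext r t
      congr 1
      simp [Nat.succ_eq_add_one, hzw, hhi]
      ring
    have hre2 : pre ++ (List.zipWith (fzt1Cadd m) (rest.take H) ((rest.drop H).take H)
          ++ ([] ++ ((rest.drop H).take H ++ rest.drop (2 * H))))
        = (pre ++ (List.zipWith (fzt1Cadd m) (rest.take H) ((rest.drop H).take H) ++ (rest.drop H).take H))
            ++ rest.drop (2 * H) := by
      simp
    rw [hfun, hre2, ih _ _ (by simp; omega)]
    conv_rhs => rw [hdecomp]
    rw [pvLevel_block m H (by omega) _ _ _ hlo hhi]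
    simp

lemma pvPass (m : Int) (H : Nat) (hH : H ≠ 0) (nb : Nat) (r : List Int) (hr : r.length = nb * (2 * H)) :
    (PySem.List.pyRange 0 (r.length : Int) ((2 * H : Nat) : Int)).foldl (pvBlock m H) r = pvLevel m H r := by
  have hHpos : (0 : Int) < ((2 * H : Nat) : Int) := by
    have : 0 < 2 * H := by omega
    exact_mod_cast this
  rw [PySem.List.pyRange_of_pos 0 (r.length : Int) hHpos]
  by_cases hnil : r.length = 0
  · have : r = [] := List.eq_nil_of_length_eq_zero hnil
    subst this
    rw [pvLevel_nil]
    simp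
  · have hif : (if (0 : Int) < (r.length : Int)
          then (((r.length : Int) - 0 + ((2 * H : Nat) : Int) - 1) / ((2 * H : Nat) : Int)).toNat
          else 0) = nb := by
      rw [if_pos (by exact_mod_cast Nat.pos_of_ne_zero hnil)]
      rw [hr]
      push_cast
      have harr : ((nb : Int) * (2 * (H : Int)) - 0 + 2 * (H : Int) - 1)
          = (2 * (H : Int) - 1) + (nb : Int) * (2 * (H : Int)) := by ring
      rw [harr, Int.add_mul_ediv_right _ _ (by omega : (2 * (H : Int)) ≠ 0)]
      rw [Int.ediv_eq_zero_of_lt (by omega) (by omega)]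
      simp
    rw [hif, List.foldl_map]
    have hfun : (fun (x : List Int) (y : Nat) => pvBlock m H x (0 + ((2 * H : Nat) : Int) * (y : Int)))
        = fun (x : List Int) (y : Nat) =>
            pvBlock m H x ((((List.nil (α := Int)).length : Nat) : Int) + ((2 * H : Nat) : Int) * (y : Int)) := by
      funext x y
      simp
    rw [hfun]
    have := pvBlocks m H hH nb [] r (by simpa using hr)
    simpa using this

lemma pvLevel_split (m : Int) (h : Nat) :
    ∀ (n : Nat) (a b : List Int), a.length = n → 2 * h ∣ n →
    pvLevel m h (a ++ b) = pvLevel m h a ++ pvLevel m h b := by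
  intro n
  induction n using Nat.strong_induction_on with
  | _ n ih =>
    intro a b ha hd
    by_cases h0 : h = 0
    · have hz : ∀ xs : List Int, pvLevel m h xs = xs := by
        intro xs
        rw [pvLevel, dif_pos (Or.inl h0)]
      rw [hz, hz, hz]
    · rcases Nat.eq_zero_or_pos n with hn | hn
      · have : a = [] := List.eq_nil_of_length_eq_zero (by omega)
        subst this
        simp [pvLevel_nil]
      · have h2h : 2 * h ≤ n := Nat.le_of_dvd hn hd
        have hlo : (a.take h).length = h := by simp; omega
        have hhi : ((a.drop h).take h).length = h := by simp; omega
        have e3 : (a.drop h).drop h = a.drop (2 * h) := by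
          rw [List.drop_drop]
          congr 1
          omega
        have hdecomp : a = a.take h ++ ((a.drop h).take h ++ a.drop (2 * h)) := by
          calc a = a.take h ++ a.drop h := (List.take_append_drop h a).symm
            _ = a.take h ++ ((a.drop h).take h ++ (a.drop h).drop h) := by
                  rw [List.take_append_drop h (a.drop h)]
            _ = a.take h ++ ((a.drop h).take h ++ a.drop (2 * h)) := by rw [e3]
        have hrl : (a.drop (2 * h)).length = n - 2 * h := by simp; omega
        have hrec := ih (n - 2 * h) (by omega) (a.drop (2 * h)) b hrl (Nat.dvd_sub hd dvd_rfl)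
        conv_lhs => rw [hdecomp]
        have e : (a.take h ++ ((a.drop h).take h ++ a.drop (2 * h))) ++ b
            = a.take h ++ ((a.drop h).take h ++ (a.drop (2 * h) ++ b)) := by simp
        rw [e, pvLevel_block m h h0 _ _ _ hlo hhi, hrec]
        conv_rhs => rw [hdecomp]
        rw [pvLevel_block m h h0 _ _ _ hlo hhi]
        simp [List.append_assoc]

lemma pvAL_succ (m : Int) (d : Nat) (xs : List Int) :
    pvAL m (d + 1) xs = pvLevel m (2 ^ d) (pvAL m d xs) := by
  simp [pvAL, List.range_succ]

lemma pvAL_length (m : Int) (d : Nat) (xs : List Int) : (pvAL m d xs).length = xs.length := by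
  induction d with
  | zero => rfl
  | succ d ih => rw [pvAL_succ, pvLevel_length, ih]

lemma pvAL_split (m : Int) : ∀ (d : Nat) (x y : List Int), (2 ^ d : Nat) ∣ x.length →
    pvAL m d (x ++ y) = pvAL m d x ++ pvAL m d y := by
  intro d
  induction d with
  | zero => intro x y _; simp [pvAL]
  | succ d ih =>
    intro x y hd
    rw [pvAL_succ, pvAL_succ, pvAL_succ]
    rw [ih x y (dvd_trans (pow_dvd_pow 2 (Nat.le_succ d)) hd)]
    exact pvLevel_split m (2 ^ d) (pvAL m d x).length _ _ rfl
      (by rw [pvAL_length]; have e : 2 * 2 ^ d = 2 ^ (d + 1) := by rw [pow_succ]; ring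
          rw [e]; exact hd)

lemma pvZipMap (m : Int) : ∀ (lo hi : List Int),
    (lo.zip hi).map (fun p => fzt1Cadd m p.1 p.2) = List.zipWith (fzt1Cadd m) lo hi := by
  intro lo
  induction lo with
  | nil => intro hi; simp
  | cons x lo ih =>
    intro hi
    cases hi with
    | nil => simp
    | cons y hi => simp [ih]

lemma pvRec_eq (m : Int) : ∀ (d : Nat) (a : List Int), a.length = 2 ^ d →
    fzt1Rec m a = pvAL m d a := by
  intro d
  induction d with
  | zero =>
    intro a ha
    rw [fzt1Rec, dif_pos (by omega), pvAL]
    rfl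
  | succ d ih =>
    intro a ha
    have hp : 2 ^ (d + 1) = 2 * 2 ^ d := by rw [pow_succ]; ring
    have hp1 : 1 ≤ 2 ^ d := Nat.one_le_two_pow
    have h2 : ¬ a.length ≤ 1 := by omega
    have hhalf : a.length / 2 = 2 ^ d := by omega
    rw [fzt1Rec, dif_neg h2]
    simp only [hhalf]
    have hta : (a.take (2 ^ d)).length = 2 ^ d := by simp; omega
    have hda : (a.drop (2 ^ d)).length = 2 ^ d := by simp; omega
    rw [ih _ hta, ih _ hda, pvZipMap]
    rw [pvAL_succ]
    conv_rhs => rw [← List.take_append_drop (2 ^ d) a]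
    rw [pvAL_split m d _ _ (by rw [hta])]
    have he : pvAL m d (a.take (2 ^ d)) ++ pvAL m d (a.drop (2 ^ d))
        = pvAL m d (a.take (2 ^ d)) ++ (pvAL m d (a.drop (2 ^ d)) ++ []) := by simp
    rw [he, pvLevel_block m (2 ^ d) (by omega) _ _ _ (by rw [pvAL_length, hta]) (by rw [pvAL_length, hda])]
    rw [pvLevel_nil]
    simp

lemma pvPassA (modulo : Int) (i : Nat) (bt nb : Nat) (s : List Int)
    (hs : s.length = bt) (hbt : bt = nb * (2 * 2 ^ i)) :
    (PySem.List.pyRange 0 (bt : Int) (2 ^ (i + 1))).foldl (fun r j =>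
      (List.range (2 ^ i)).foldl (fun r (k : Nat) =>
        let r := PySem.List.pySetD r (j + (k : Int))
          (PySem.List.pyGetD r (j + (k : Int)) 0 + PySem.List.pyGetD r (j + (k : Int) + 2 ^ i) 0)
        if modulo ≠ 0 then
          if PySem.List.pyGetD r (j + (k : Int)) 0 ≥ modulo then
            PySem.List.pySetD r (j + (k : Int)) (PySem.List.pyGetD r (j + (k : Int)) 0 - modulo)
          else r
        else r) r) s
    = pvLevel modulo (2 ^ i) s := by
  have hfun : (fun (r : List Int) (j : Int) =>
        (List.range (2 ^ i)).foldl (fun r (k : Nat) =>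
          let r := PySem.List.pySetD r (j + (k : Int))
            (PySem.List.pyGetD r (j + (k : Int)) 0 + PySem.List.pyGetD r (j + (k : Int) + 2 ^ i) 0)
          if modulo ≠ 0 then
            if PySem.List.pyGetD r (j + (k : Int)) 0 ≥ modulo then
              PySem.List.pySetD r (j + (k : Int)) (PySem.List.pyGetD r (j + (k : Int)) 0 - modulo)
            else r
          else r) r)
      = pvBlock modulo (2 ^ i) := by
    funext r j
    show (List.range (2 ^ i)).foldl
      (fun r (k : Nat) => pvStep modulo ((2 : Int) ^ i) r (j + (k : Int))) r = _
    rw [show ((2 : Int) ^ i) = ((2 ^ i : Nat) : Int) by push_cast; ring]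
    rfl
  have hc1 : ((2 : Int) ^ (i + 1)) = ((2 * 2 ^ i : Nat) : Int) := by push_cast; ring
  have hc2 : (bt : Int) = (s.length : Int) := by rw [hs]
  rw [hfun, hc1, hc2]
  exact pvPass modulo (2 ^ i) (by positivity) nb s (by omega)

-- ===== VERDICT (by name: the statement is the Claim_ definition above) =====
theorem fzt1_spec : Claim_equal_fzt1 := by
  intro f modulo _
  show fzt1 f modulo = fzt1_alt f modulo
  have hbt2 : (fzt1BT f.length 1 0).1 = 2 ^ (fzt1BT f.length 1 0).2 :=
    fzt1BT_pow f.length 1 0 (by norm_num)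
  have hge : f.length ≤ (fzt1BT f.length 1 0).1 := fzt1BT_ge f.length 1 0 one_ne_zero
  have hbtB : fzt1AltBT f.length 1 = (fzt1BT f.length 1 0).1 := fzt1AltBT_eq f.length 1 0
  set bt := (fzt1BT f.length 1 0).1 with hbtdef
  set depth := (fzt1BT f.length 1 0).2 with hdepthdef
  have hpad : (List.range f.length).foldl
      (fun r (i : Nat) => PySem.List.pySetD r (i : Int) (PySem.List.pyGetD f (i : Int) 0))
      (List.replicate bt (0 : Int)) = f ++ List.replicate (bt - f.length) 0 := by
    rw [pvPad f f.length (List.replicate bt 0) le_rfl (by simp; omega)]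
    simp [List.drop_replicate]
  have hlen0 : (f ++ List.replicate (bt - f.length) (0 : Int)).length = 2 ^ depth := by
    simp
    omega
  have key : ∀ d, d ≤ depth →
      (List.range d).foldl (fun r i =>
        let offset : Int := 2 ^ (i + 1)
        (PySem.List.pyRange 0 (bt : Int) offset).foldl (fun r j =>
          (List.range (2 ^ i)).foldl (fun r (k : Nat) =>
            let r := PySem.List.pySetD r (j + (k : Int))
              (PySem.List.pyGetD r (j + (k : Int)) 0 + PySem.List.pyGetD r (j + (k : Int) + 2 ^ i) 0)
            if modulo ≠ 0 then
              if PySem.List.pyGetD r (j + (k : Int)) 0 ≥ modulo then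
                PySem.List.pySetD r (j + (k : Int)) (PySem.List.pyGetD r (j + (k : Int)) 0 - modulo)
              else r
            else r) r) r) (f ++ List.replicate (bt - f.length) 0)
      = pvAL modulo d (f ++ List.replicate (bt - f.length) 0) := by
    intro d
    induction d with
    | zero => intro _; rfl
    | succ d ih =>
      intro hd
      rw [List.range_succ, List.foldl_append, ih (by omega)]
      simp only [List.foldl_cons, List.foldl_nil]
      rw [pvAL_succ]
      have hs : (pvAL modulo d (f ++ List.replicate (bt - f.length) 0)).length = bt := by
        rw [pvAL_length]
        simp
        omega
      have hsplit : bt = 2 ^ (depth - (d + 1)) * (2 * 2 ^ d) := by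
        have e1 : 2 * 2 ^ d = 2 ^ (d + 1) := by rw [pow_succ]; ring
        have e2 : 2 ^ (depth - (d + 1)) * 2 ^ (d + 1) = 2 ^ depth := by
          rw [← pow_add]
          congr 1
          omega
        rw [e1, e2, hbt2]
      exact pvPassA modulo d bt (2 ^ (depth - (d + 1))) _ hs hsplit
  rw [fzt1, fzt1_alt]
  simp only
  rw [hpad, hbtB, key depth le_rfl, pvRec_eq modulo depth _ hlen0]
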